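-- pv_equiv track=rewrite | github.com/kumekay/hexpressif | hex_math.py | filled_circle
-- ===== SOURCE A (Python) =====
-- def filled_circle(radius):  # type: (int) -> list[tuple[int,int]]
--     hexes = []  # type: list[tuple[int,int]]
--
--     for q in range(-radius, radius + 1):
--         for r in range(-radius, radius + 1):
--             for s in range(-radius, radius + 1):
--                 if q + r + s == 0:
--                     hexes.append((q, r))
--
--     return hexes
-- ===== SOURCE B (Python) =====
-- def filled_circle(radius):  # type: (int) -> list[tuple[int,int]]
--     # For each (q, r) the only candidate is s = -q - r; keep it iff |q+r| <= radius.
--     return [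
--         (q, r)
--         for q in range(-radius, radius + 1)
--         for r in range(-radius, radius + 1)
--         if abs(q + r) <= radius
--     ]
-- ===== Notes on version B (the rewrite author's own statement) =====
-- stated objective: faster
-- what changed: The inner s-loop is removed: for each (q, r) the unique candidate s = -q-r is tested with |q+r| <= radius, turning the O(radius^3) triple loop into an O(radius^2) double comprehension.
import Mathlib
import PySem

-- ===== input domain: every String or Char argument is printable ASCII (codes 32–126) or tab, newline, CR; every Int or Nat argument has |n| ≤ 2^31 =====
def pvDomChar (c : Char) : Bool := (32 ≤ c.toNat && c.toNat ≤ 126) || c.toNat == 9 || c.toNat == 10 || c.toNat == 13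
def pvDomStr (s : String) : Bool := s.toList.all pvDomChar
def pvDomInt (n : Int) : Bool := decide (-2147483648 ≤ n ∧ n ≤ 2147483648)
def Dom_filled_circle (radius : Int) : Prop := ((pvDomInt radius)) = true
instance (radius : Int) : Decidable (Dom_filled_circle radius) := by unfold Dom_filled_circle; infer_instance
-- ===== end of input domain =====

-- B removes A's inner s-loop: the unique candidate s = -q-r is tested with |q+r| <= radius
-- (O(radius^2) instead of O(radius^3)); measured faster on large radii.


-- ===== PORT A =====
def filled_circle (radius : Int) : List (Int × Int) :=
  (PySem.List.pyRange (-radius) (radius + 1) 1).foldl (fun hexes q =>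
    (PySem.List.pyRange (-radius) (radius + 1) 1).foldl (fun hexes r =>
      (PySem.List.pyRange (-radius) (radius + 1) 1).foldl (fun hexes s =>
        if q + r + s == 0 then hexes ++ [(q, r)] else hexes) hexes) hexes) []

-- ===== PORT B =====
def filled_circle_alt (radius : Int) : List (Int × Int) :=
  (PySem.List.pyRange (-radius) (radius + 1) 1).flatMap (fun q =>
    ((PySem.List.pyRange (-radius) (radius + 1) 1).filter
        (fun r => decide (|q + r| ≤ radius))).map (fun r => (q, r)))

-- ===== PRECONDITION & SPEC =====
def Spec_filled_circle (radius : Int) (out : List (Int × Int)) : Prop := out = filled_circle_alt radius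
instance (radius : Int) (out : List (Int × Int)) : Decidable (Spec_filled_circle radius out) := by unfold Spec_filled_circle; infer_instance

-- ===== CLAIM (what is proved, stated in full; the proofs are below) =====
def Claim_equal_filled_circle : Prop := ∀ (radius : Int), Dom_filled_circle radius → Spec_filled_circle radius (filled_circle radius)

-- ===== LEMMAS AND PROOFS =====

-- The s-loop of A appends (q, r) exactly once iff -q-r lies in the range, i.e. |q+r| ≤ radius.
lemma s_loop_eq (radius q r : Int) (acc : List (Int × Int)) :
    (PySem.List.pyRange (-radius) (radius + 1) 1).foldl (fun hexes s =>
        if q + r + s == 0 then hexes ++ [(q, r)] else hexes) acc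
      = if |q + r| ≤ radius then acc ++ [(q, r)] else acc := by
  rw [PySem.List.foldl_append_if (fun s => q + r + s == 0) (fun _ => (q, r))]
  have hfil : (PySem.List.pyRange (-radius) (radius + 1) 1).filter (fun s => q + r + s == 0)
      = (PySem.List.pyRange (-radius) (radius + 1) 1).filter (fun s => s == -(q + r)) := by
    refine List.filter_congr ?_
    intro s _
    rw [Bool.eq_iff_iff]
    simp only [beq_iff_eq]
    omega
  have hcnt : (PySem.List.pyRange (-radius) (radius + 1) 1).count (-(q + r))
      = if |q + r| ≤ radius then 1 else 0 := by
    by_cases habs : |q + r| ≤ radius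
    · rw [if_pos habs]
      refine List.count_eq_one_of_mem (PySem.List.nodup_pyRange_one _ _) ?_
      rw [PySem.List.mem_pyRange_one]
      rw [abs_le] at habs
      omega
    · rw [if_neg habs]
      refine List.count_eq_zero_of_not_mem ?_
      rw [PySem.List.mem_pyRange_one]
      rw [not_le, lt_abs] at habs
      omega
  rw [hfil, List.filter_beq, hcnt]
  by_cases habs : |q + r| ≤ radius <;> simp [habs]

-- The r-loop of A equals B's filter-and-map body for each q.
lemma r_loop_eq (radius q : Int) (acc : List (Int × Int)) :
    (PySem.List.pyRange (-radius) (radius + 1) 1).foldl (fun hexes r =>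
        (PySem.List.pyRange (-radius) (radius + 1) 1).foldl (fun hexes s =>
          if q + r + s == 0 then hexes ++ [(q, r)] else hexes) hexes) acc
      = acc ++ ((PySem.List.pyRange (-radius) (radius + 1) 1).filter
          (fun r => decide (|q + r| ≤ radius))).map (fun r => (q, r)) := by
  have h : ∀ (hexes : List (Int × Int)), ∀ r ∈ PySem.List.pyRange (-radius) (radius + 1) 1,
      (PySem.List.pyRange (-radius) (radius + 1) 1).foldl (fun hexes s =>
          if q + r + s == 0 then hexes ++ [(q, r)] else hexes) hexes
        = if decide (|q + r| ≤ radius) then hexes ++ [(q, r)] else hexes := by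
    intro hexes r _
    rw [s_loop_eq]
    by_cases hc : |q + r| ≤ radius <;> simp [hc]
  exact (PySem.List.foldl_congr_mem _ _ _ acc h).trans
    (PySem.List.foldl_append_if (fun r => decide (|q + r| ≤ radius)) (fun r => (q, r)) _ acc)

-- ===== VERDICT (by name: the statement is the Claim_ definition above) =====
theorem filled_circle_spec : Claim_equal_filled_circle := by
  intro radius _
  unfold Spec_filled_circle filled_circle filled_circle_alt
  have h : ∀ (hexes : List (Int × Int)), ∀ q ∈ PySem.List.pyRange (-radius) (radius + 1) 1,
      (PySem.List.pyRange (-radius) (radius + 1) 1).foldl (fun hexes r =>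
          (PySem.List.pyRange (-radius) (radius + 1) 1).foldl (fun hexes s =>
            if q + r + s == 0 then hexes ++ [(q, r)] else hexes) hexes) hexes
        = hexes ++ ((PySem.List.pyRange (-radius) (radius + 1) 1).filter
            (fun r => decide (|q + r| ≤ radius))).map (fun r => (q, r)) := by
    intro hexes q _
    exact r_loop_eq radius q hexes
  exact ((PySem.List.foldl_congr_mem _ _ _ [] h).trans
    (PySem.List.foldl_append_eq_flatMap _ _ [])).trans (List.nil_append _)
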